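-- pv_equiv track=rewrite | github.com/Krazy0range/sudoku | main.py | shift_board
-- ===== SOURCE A (Python) =====
-- from math import floor
--
-- def shift_board(board, x_shift=0, y_shift=0):
--   _board = board.copy()
--
--   for i in range(9):
--     x, y = convert_ij_to_xy(0, i)
--     x = (x - x_shift) % 3
--     y = (y - y_shift) % 3
--     _, _i = convert_xy_to_ij(x, y)
--     _board[_i] = board[i]
--
--   return _board
--
-- def convert_xy_to_ij(x, y):
--   i = floor(x / 3) + (floor(y / 3) * 3)
--   j = x % 3 + ((y % 3) * 3)
--   return (i, j)
--
-- def convert_ij_to_xy(i, j):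
--   x = j % 3 + ((i % 3) * 3)
--   y = floor(j / 3) + (floor(i / 3) * 3)
--   return (x, y)
-- ===== SOURCE B (Python) =====
-- def shift_board(board, x_shift=0, y_shift=0):
--     grid = [board[3 * r:3 * r + 3] for r in range(3)]
--     new = [[grid[(r + y_shift) % 3][(c + x_shift) % 3] for c in range(3)]
--            for r in range(3)]
--     _board = board.copy()
--     _board[0:9] = [v for row in new for v in row]
--     return _board
-- ===== Notes on version B (the rewrite author's own statement) =====
-- stated objective: simpler
-- what changed: B reshapes the first nine entries into a 3x3 grid and builds the shifted grid directly with new[r][c] = grid[(r+y_shift)%3][(c+x_shift)%3], instead of A's per-index round-trips through the convert_ij_to_xy/convert_xy_to_ij coordinate helpers with index-by-index writes.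
import Mathlib
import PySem

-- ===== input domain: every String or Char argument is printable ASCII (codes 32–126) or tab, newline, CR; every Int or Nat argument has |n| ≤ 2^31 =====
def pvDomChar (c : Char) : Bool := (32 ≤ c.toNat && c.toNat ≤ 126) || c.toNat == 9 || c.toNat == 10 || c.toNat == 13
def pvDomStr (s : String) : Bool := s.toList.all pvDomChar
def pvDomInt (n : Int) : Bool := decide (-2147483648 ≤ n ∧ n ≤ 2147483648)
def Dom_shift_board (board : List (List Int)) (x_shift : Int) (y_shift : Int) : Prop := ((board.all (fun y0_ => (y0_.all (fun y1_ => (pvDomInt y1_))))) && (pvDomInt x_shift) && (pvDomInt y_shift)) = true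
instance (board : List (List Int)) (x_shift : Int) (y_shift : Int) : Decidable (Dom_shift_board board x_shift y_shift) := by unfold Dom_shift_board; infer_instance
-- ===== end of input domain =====

-- B replaces A's per-index coordinate conversions with a 3x3 grid reshape: simpler/alternative, same cost; equivalence is about the return value (neither mutates its argument).

-- ===== PORT A =====
-- floor(x / 3) in Python is float floor; it equals x // 3 exactly for the small ints this code passes
def convert_xy_to_ij (x y : Int) : Int × Int :=
  (PySem.Int.floordiv x 3 + PySem.Int.floordiv y 3 * 3,
   PySem.Int.mod x 3 + PySem.Int.mod y 3 * 3)

def convert_ij_to_xy (i j : Int) : Int × Int :=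
  (PySem.Int.mod j 3 + PySem.Int.mod i 3 * 3,
   PySem.Int.floordiv j 3 + PySem.Int.floordiv i 3 * 3)

def shift_board (board : List (List Int)) (x_shift : Int) (y_shift : Int) : List (List Int) :=
  (PySem.List.pyRange 0 9 1).foldl (fun _board i =>
    let xy := convert_ij_to_xy 0 i
    let x := PySem.Int.mod (xy.1 - x_shift) 3
    let y := PySem.Int.mod (xy.2 - y_shift) 3
    let _i := (convert_xy_to_ij x y).2
    -- `_board[_i] = board[i]`: _i is always in 0..8 (so nonneg and, under Pre_, in range);
    -- board[i] raises (pyGet? = none) iff board.length ≤ i, excluded by Pre_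
    _board.set _i.toNat ((PySem.List.pyGet? board i).getD [])) board

-- ===== PORT B =====
def shift_board_alt (board : List (List Int)) (x_shift : Int) (y_shift : Int) : List (List Int) :=
  let grid := (List.range 3).map (fun r => PySem.List.slice board (some (3*(r:Int))) (some (3*(r:Int)+3)))
  -- the two Python mod-3 indices are always in 0..2, so plain getD is exact here (raises only outside Pre_)
  let new := (List.range 3).map (fun r => (List.range 3).map (fun c =>
      (grid.getD (PySem.Int.mod ((r:Int) + y_shift) 3).toNat []).getD (PySem.Int.mod ((c:Int) + x_shift) 3).toNat []))
  -- `_board[0:9] = flat` on a copy of board: the 9 new entries followed by the untouched tail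
  new.flatten ++ board.drop 9

-- ===== PRECONDITION & SPEC =====
-- Pre_ excludes boards with fewer than 9 rows: there A raises IndexError (board[i]).
def Pre_shift_board (board : List (List Int)) (x_shift : Int) (y_shift : Int) : Prop :=
  9 ≤ board.length
instance (board : List (List Int)) (x_shift : Int) (y_shift : Int) : Decidable (Pre_shift_board board x_shift y_shift) := by unfold Pre_shift_board; infer_instance

def pvWitness_shift_board : List (List Int) × Int × Int :=
  ([[1], [2], [3], [4], [5], [6], [7], [8], [9]], 1, 2)

def Spec_shift_board (board : List (List Int)) (x_shift : Int) (y_shift : Int) (out : List (List Int)) : Prop := out = shift_board_alt board x_shift y_shift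
instance (board : List (List Int)) (x_shift : Int) (y_shift : Int) (out : List (List Int)) : Decidable (Spec_shift_board board x_shift y_shift out) := by unfold Spec_shift_board; infer_instance

-- ===== CLAIM (what is proved, stated in full; the proofs are below) =====
def Claim_equal_shift_board : Prop := ∀ (board : List (List Int)) (x_shift : Int) (y_shift : Int), Dom_shift_board board x_shift y_shift → Pre_shift_board board x_shift y_shift → Spec_shift_board board x_shift y_shift (shift_board board x_shift y_shift)

-- ===== LEMMAS AND PROOFS =====

set_option maxHeartbeats 2000000 in
theorem pv_main (b0 b1 b2 b3 b4 b5 b6 b7 b8 : List Int) (t : List (List Int)) (x_shift y_shift : Int) :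
    shift_board (b0 :: b1 :: b2 :: b3 :: b4 :: b5 :: b6 :: b7 :: b8 :: t) x_shift y_shift
      = shift_board_alt (b0 :: b1 :: b2 :: b3 :: b4 :: b5 :: b6 :: b7 :: b8 :: t) x_shift y_shift := by
  have hR : PySem.List.pyRange 0 9 1
      = [((0:Nat):Int),((1:Nat):Int),((2:Nat):Int),((3:Nat):Int),((4:Nat):Int),
         ((5:Nat):Int),((6:Nat):Int),((7:Nat):Int),((8:Nat):Int)] := by decide
  have hx : x_shift % 3 = 0 ∨ x_shift % 3 = 1 ∨ x_shift % 3 = 2 := by omega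
  have hy : y_shift % 3 = 0 ∨ y_shift % 3 = 1 ∨ y_shift % 3 = 2 := by omega
  have hsx : ∀ e : Int, (e - x_shift) % 3 = (e - x_shift % 3) % 3 := fun e => by omega
  have hax : ∀ e : Int, (e + x_shift) % 3 = (e + x_shift % 3) % 3 := fun e => by omega
  have hsy : ∀ e : Int, (e - y_shift) % 3 = (e - y_shift % 3) % 3 := fun e => by omega
  have hay : ∀ e : Int, (e + y_shift) % 3 = (e + y_shift % 3) % 3 := fun e => by omega
  simp only [shift_board, shift_board_alt, convert_ij_to_xy, convert_xy_to_ij, hR, List.foldl,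
    List.range_succ, List.range_zero, List.nil_append, List.cons_append,
    PySem.List.pyGet?_natCast,
    PySem.Int.mod_eq_emod_of_pos (by norm_num : (0:Int) < 3),
    PySem.Int.floordiv_eq_ediv_of_pos (by norm_num : (0:Int) < 3)]
  rcases hx with hx|hx|hx <;> rcases hy with hy|hy|hy <;>
    · simp only [hsx, hax, hsy, hay, hx, hy]
      simp [PySem.List.slice_toNat, List.set, List.getD, List.flatten,
        List.take_succ_cons, List.drop_succ_cons]

-- ===== VERDICT (by name: the statement is the Claim_ definition above) =====
theorem shift_board_spec : Claim_equal_shift_board := by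
  intro board x_shift y_shift _ hpre
  unfold Pre_shift_board at hpre
  unfold Spec_shift_board
  match board, hpre with
  | b0 :: b1 :: b2 :: b3 :: b4 :: b5 :: b6 :: b7 :: b8 :: t, _ =>
    exact pv_main b0 b1 b2 b3 b4 b5 b6 b7 b8 t x_shift y_shift
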